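-- pv_equiv track=rewrite | github.com/lozert/Pnipy | TechObrInform/Hamming.py | adjust_packets
-- ===== SOURCE A (Python) =====
-- def adjust_packets(bitcode, len_block=16):
--     """Разбиение данные на блоки"""
--     packets = [bitcode[i:i+len_block] for i in range(0, len(bitcode), len_block)]
--     try:
--         if len(packets[-1]) < len_block:
--             packets[-2] = packets[-2] + packets[-1]
--             packets.pop()
--     except:
--         pass
--     return packets
-- ===== SOURCE B (Python) =====
-- def adjust_packets(bitcode, len_block=16):
--     """Split bitcode into len_block-sized slices; the final slice absorbs a short remainder."""
--     packets = []
--     for i in range(0, len(bitcode), len_block):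
--         if len(bitcode) - i < 2 * len_block:
--             packets.append(bitcode[i:])
--             break
--         packets.append(bitcode[i:i + len_block])
--     return packets
-- ===== Notes on version B (the rewrite author's own statement) =====
-- stated objective: simpler
-- what changed: B is a single pass over the block starts that, when fewer than two blocks' worth of characters remain, emits the whole rest and stops, so the short tail is absorbed as the blocks are produced; A builds all fixed-size blocks first and then patches the short tail via negative indexing inside try/except. Pre_ excludes only len_block == 0, where both A and B raise ValueError from range().
import Mathlib
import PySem

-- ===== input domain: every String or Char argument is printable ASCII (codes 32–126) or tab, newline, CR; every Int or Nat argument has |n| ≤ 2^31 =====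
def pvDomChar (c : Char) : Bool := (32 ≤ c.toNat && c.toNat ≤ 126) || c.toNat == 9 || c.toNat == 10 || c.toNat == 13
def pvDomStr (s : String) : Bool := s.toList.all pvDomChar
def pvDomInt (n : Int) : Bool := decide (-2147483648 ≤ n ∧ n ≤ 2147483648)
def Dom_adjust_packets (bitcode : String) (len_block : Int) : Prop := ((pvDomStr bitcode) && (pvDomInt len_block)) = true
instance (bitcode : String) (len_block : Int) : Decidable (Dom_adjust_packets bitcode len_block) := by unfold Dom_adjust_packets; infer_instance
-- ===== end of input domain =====

-- B emits the blocks in one pass, absorbing the short tail as it goes, instead of A's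
-- build-all-blocks-then-patch-the-tail fixup via negative indexing under try/except (objective: simpler).

-- ===== PORT A =====
-- packets = [bitcode[i:i+len_block] for i in range(0, len(bitcode), len_block)]
def pvChunksA (s : List Char) (L : Int) : List (List Char) :=
  (PySem.List.pyRange 0 s.length L).map (fun i => PySem.List.slice s (some i) (some (i + L)))

-- the try/except fixup: packets[-1] / packets[-2] via pyGet? (none = IndexError = 'except: pass');
-- 'packets[-2] = packets[-2] + packets[-1]; packets.pop()' = keep all but the last two, append the merge
def pvFixA (L : Int) (packets : List (List Char)) : List (List Char) :=
  match PySem.List.pyGet? packets (-1) with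
  | none => packets
  | some last =>
    if (last.length : Int) < L then
      match PySem.List.pyGet? packets (-2) with
      | none => packets
      | some prev => packets.dropLast.dropLast ++ [prev ++ last]
    else packets

def adjust_packets (bitcode : String) (len_block : Int) : List String :=
  (pvFixA len_block (pvChunksA bitcode.toList len_block)).map String.ofList

-- ===== PORT B =====
-- the body of Source B's for-loop with break: recursion over the index list 'range(0, len(bitcode), len_block)';
-- the true branch appends bitcode[i:] and stops (break), the false branch appends bitcode[i:i+len_block] and continues
def pvBLoop (s : List Char) (L : Int) : List Int → List (List Char)
  | [] => []
  | i :: rest =>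
      if (s.length : Int) - i < 2 * L then [PySem.List.slice s (some i) none]
      else PySem.List.slice s (some i) (some (i + L)) :: pvBLoop s L rest

def adjust_packets_alt (bitcode : String) (len_block : Int) : List String :=
  (pvBLoop bitcode.toList len_block (PySem.List.pyRange 0 bitcode.toList.length len_block)).map String.ofList

-- ===== PRECONDITION & SPEC =====
-- A raises ValueError (range() with step 0) exactly when len_block = 0; nothing else is excluded.
def Pre_adjust_packets (bitcode : String) (len_block : Int) : Prop := len_block ≠ 0
instance (bitcode : String) (len_block : Int) : Decidable (Pre_adjust_packets bitcode len_block) := by unfold Pre_adjust_packets; infer_instance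
def pvWitness_adjust_packets : String × Int := ("abcde", 2)

def Spec_adjust_packets (bitcode : String) (len_block : Int) (out : List String) : Prop := out = adjust_packets_alt bitcode len_block
instance (bitcode : String) (len_block : Int) (out : List String) : Decidable (Spec_adjust_packets bitcode len_block out) := by unfold Spec_adjust_packets; infer_instance

-- ===== CLAIM (what is proved, stated in full; the proofs are below) =====
def Claim_equal_adjust_packets : Prop := ∀ (bitcode : String) (len_block : Int), Dom_adjust_packets bitcode len_block → Pre_adjust_packets bitcode len_block → Spec_adjust_packets bitcode len_block (adjust_packets bitcode len_block)

-- ===== LEMMAS AND PROOFS =====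

-- canonical "merged chunks" value, block size L+1
def pvM (L : Nat) (s : List Char) : List (List Char) :=
  if s.length ≤ L + 1 then (if s.isEmpty then [] else [s])
  else if s.length < 2 * (L + 1) then [s]
  else s.take (L + 1) :: pvM L (s.drop (L + 1))
termination_by s.length
decreasing_by simp; omega

lemma pvChunksA_nil (L : Int) : pvChunksA [] L = [] := by
  simp [pvChunksA, PySem.List.pyRange]

lemma pvChunksA_neg (s : List Char) (L : Int) (h : L < 0) : pvChunksA s L = [] := by
  have h0 : ¬ ((s.length : Int) < 0) := by omega
  simp [pvChunksA, PySem.List.pyRange, h.ne, h0]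
  exact fun hL _ => absurd hL (by omega)

lemma pvFixA_nil (L : Int) : pvFixA L [] = [] := by
  simp [pvFixA, PySem.List.pyGet?, PySem.List.pyIdx?]

lemma pvFixA_single (L : Int) (x : List Char) : pvFixA L [x] = [x] := by
  simp [pvFixA, PySem.List.pyGet?, PySem.List.pyIdx?]

lemma pvFixA_pair (L : Int) (a b : List Char) :
    pvFixA L [a, b] = if (b.length : Int) < L then [a ++ b] else [a, b] := by
  simp [pvFixA, PySem.List.pyGet?, PySem.List.pyIdx?]

lemma pv_slice_shift (s : List Char) (C k : Nat) :
    PySem.List.slice s (some ((C : Int) * ((k : Int) + 1))) (some ((C : Int) * ((k : Int) + 1) + (C : Int)))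
      = PySem.List.slice (s.drop C) (some ((C : Int) * (k : Int))) (some ((C : Int) * (k : Int) + (C : Int))) := by
  have h1 : ((C : Int) * ((k : Int) + 1)) = ((C * (k + 1) : Nat) : Int) := by push_cast; ring
  have h3 : ((C : Int) * (k : Int)) = ((C * k : Nat) : Int) := by push_cast; ring
  rw [h1, h3]
  rw [show ((C * (k + 1) : Nat) : Int) + (C : Int) = ((C * (k + 1) : Nat) : Int) + ((C : Nat) : Int) from rfl,
    show ((C * k : Nat) : Int) + (C : Int) = ((C * k : Nat) : Int) + ((C : Nat) : Int) from rfl,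
    PySem.List.slice_natCast_add, PySem.List.slice_natCast_add, List.drop_drop]
  congr 2
  ring

lemma pv_count_toNat (N L : Nat) :
    (((N : Int) - 0 + ((L : Int) + 1) - 1) / ((L : Int) + 1)).toNat = (N + L) / (L + 1) := by
  have h1 : ((N : Int) - 0 + ((L : Int) + 1) - 1) = ((N + L : Nat) : Int) := by push_cast; ring
  have h2 : ((L : Int) + 1) = ((L + 1 : Nat) : Int) := by push_cast; ring
  rw [h1, h2, ← Int.natCast_div, Int.toNat_natCast]

lemma pvChunksA_len (L : Nat) (s : List Char) :
    (pvChunksA s ((L : Int) + 1)).length = (s.length + L) / (L + 1) := by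
  have hC : (0 : Int) < (L : Int) + 1 := by omega
  rw [pvChunksA, PySem.List.pyRange_of_pos _ _ hC, List.map_map, List.length_map, List.length_range]
  by_cases hN : s.length = 0
  · simp [hN, Nat.div_eq_of_lt (by omega : L < L + 1)]
  · rw [if_pos (by omega : (0:Int) < (s.length : Int))]
    exact pv_count_toNat s.length L

lemma pvChunksA_cons (L : Nat) (s : List Char) (hs : s ≠ []) :
    pvChunksA s ((L : Int) + 1) = s.take (L + 1) :: pvChunksA (s.drop (L + 1)) ((L : Int) + 1) := by
  have hC : (0 : Int) < (L : Int) + 1 := by omega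
  have hN : 0 < s.length := List.length_pos_of_ne_nil hs
  rw [pvChunksA, pvChunksA, PySem.List.pyRange_of_pos _ _ hC, PySem.List.pyRange_of_pos _ _ hC,
    List.map_map, List.map_map]
  rw [if_pos (show (0:Int) < (s.length : Int) by omega)]
  rw [pv_count_toNat]
  simp only [List.length_drop]
  by_cases hd : s.length ≤ L + 1
  · have h0 : s.length - (L+1) = 0 := by omega
    rw [h0]
    rw [if_neg (by norm_num)]
    have h1 : (s.length + L) / (L + 1) = 1 :=
      Nat.div_eq_of_lt_le (by omega) (by omega)
    rw [h1]
    simp only [List.range_one, List.map_cons, List.map_nil, Function.comp_apply]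
    norm_num
    rw [show ((L:Int)+1) = ((L+1 : Nat) : Int) by push_cast; ring, PySem.List.slice_to_natCast]
  · rw [if_pos (show (0:Int) < ((s.length - (L+1) : Nat) : Int) by omega)]
    rw [pv_count_toNat (s.length - (L+1)) L]
    have hcnt : (s.length + L) / (L+1) = (s.length - (L+1) + L) / (L+1) + 1 := by
      have h2 : s.length + L = (s.length - (L+1) + L) + (L+1) := by omega
      rw [h2, Nat.add_div_right _ (by omega)]
    rw [hcnt, List.range_succ_eq_map, List.map_cons, List.map_map]
    congr 1
    · simp only [Function.comp_apply]
      norm_num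
      rw [show ((L:Int)+1) = ((L+1 : Nat) : Int) by push_cast; ring, PySem.List.slice_to_natCast]
    · apply List.map_congr_left
      intro k hk
      simp only [Function.comp_apply, zero_add, Nat.succ_eq_add_one]
      rw [show ((L:Int)+1) = ((L+1 : Nat) : Int) by push_cast; ring]
      push_cast
      exact pv_slice_shift s (L+1) k

lemma pv_getLast?_cons {α : Type} (a : α) (l : List α) (h : l ≠ []) :
    (a :: l).getLast? = l.getLast? := by
  rcases l with - | ⟨b, t⟩
  · exact absurd rfl h
  · simp

lemma pv_pyGet?_neg_one {α : Type} (xs : List α) : PySem.List.pyGet? xs (-1) = xs.getLast? := by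
  rcases xs with - | ⟨a, t⟩
  · simp [PySem.List.pyGet?, PySem.List.pyIdx?]
  · simp only [PySem.List.pyGet?, PySem.List.pyIdx?]
    rw [if_neg (by omega), if_pos (by simp)]
    simp [List.getLast?_eq_getElem?]

lemma pv_pyGet?_neg_two {α : Type} (xs : List α) (h : 2 ≤ xs.length) :
    PySem.List.pyGet? xs (-2) = xs.dropLast.getLast? := by
  simp only [PySem.List.pyGet?, PySem.List.pyIdx?]
  rw [if_neg (by omega), if_pos (by omega)]
  simp only [Option.bind_some]
  rw [List.getLast?_eq_getElem?, List.length_dropLast, List.getElem?_dropLast,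
    if_pos (by omega)]
  congr 1

lemma pvFixA_cons (L : Int) (x : List Char) (l : List (List Char)) (h : 2 ≤ l.length) :
    pvFixA L (x :: l) = x :: pvFixA L l := by
  have hne : l ≠ [] := by intro e; rw [e] at h; simp at h
  have hdl : l.dropLast.length = l.length - 1 := by simp
  have hd : l.dropLast ≠ [] := by
    intro e
    rw [e] at hdl
    simp at hdl
    omega
  obtain ⟨y, hy⟩ := Option.isSome_iff_exists.mp (List.getLast?_isSome.mpr hne)
  obtain ⟨z, hz⟩ := Option.isSome_iff_exists.mp (List.getLast?_isSome.mpr hd)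
  rw [pvFixA, pvFixA, pv_pyGet?_neg_one, pv_pyGet?_neg_one, pv_getLast?_cons x l hne, hy]
  simp only
  by_cases hlen : (y.length : Int) < L
  · rw [if_pos hlen, if_pos hlen,
      pv_pyGet?_neg_two _ (by simp; omega), pv_pyGet?_neg_two _ h,
      List.dropLast_cons_of_ne_nil hne, pv_getLast?_cons x l.dropLast hd, hz]
    simp only
    rw [List.dropLast_cons_of_ne_nil hd]
    simp
  · rw [if_neg hlen, if_neg hlen]

lemma pvA_eq_M_aux (L : Nat) : ∀ (n : Nat) (s : List Char), s.length ≤ n →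
    pvFixA ((L : Int) + 1) (pvChunksA s ((L : Int) + 1)) = pvM L s := by
  intro n
  induction n with
  | zero =>
    intro s hs
    have h0 : s = [] := List.eq_nil_of_length_eq_zero (by omega)
    subst h0
    rw [pvChunksA_nil, pvFixA_nil, pvM]
    simp
  | succ n IH =>
    intro s hs
    by_cases h0 : s = []
    · subst h0
      rw [pvChunksA_nil, pvFixA_nil, pvM]
      simp
    · have hN : 0 < s.length := List.length_pos_of_ne_nil h0
      rw [pvChunksA_cons L s h0]
      by_cases h1 : s.length ≤ L + 1
      · rw [List.drop_eq_nil_iff.mpr (by omega), pvChunksA_nil, pvFixA_single,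
          List.take_of_length_le h1, pvM, if_pos h1]
        simp [h0]
      · have hd0 : s.drop (L+1) ≠ [] := by
          intro e
          have := congrArg List.length e
          simp at this
          omega
        by_cases h2 : s.length ≤ 2 * (L + 1)
        · rw [pvChunksA_cons L _ hd0,
            show List.drop (L+1) (List.drop (L+1) s) = [] from List.drop_eq_nil_iff.mpr (by simp; omega),
            pvChunksA_nil,
            show List.take (L+1) (List.drop (L+1) s) = List.drop (L+1) s from
              List.take_of_length_le (by simp; omega),
            pvFixA_pair]
          by_cases h3 : s.length < 2 * (L + 1)
          · rw [if_pos (by simp; omega), List.take_append_drop, pvM, if_neg h1, if_pos h3]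
          · rw [if_neg (by simp; omega), pvM, if_neg h1, if_neg h3]
            congr 1
            rw [pvM, if_pos (by simp; omega)]
            simp [hd0]
        · have hlen2 : 2 ≤ (pvChunksA (s.drop (L+1)) ((L : Int) + 1)).length := by
            rw [pvChunksA_len]
            refine (Nat.le_div_iff_mul_le (by omega)).mpr ?_
            simp
            omega
          rw [pvFixA_cons _ _ _ hlen2, IH (s.drop (L+1)) (by simp; omega)]
          conv_rhs => rw [pvM]
          rw [if_neg h1, if_neg (by omega)]

lemma pvA_eq_M (L : Nat) (s : List Char) :
    pvFixA ((L : Int) + 1) (pvChunksA s ((L : Int) + 1)) = pvM L s :=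
  pvA_eq_M_aux L s.length s le_rfl

-- B-side: shifting the loop by one block. All indices in the tail of the range are C*(k+1);
-- processing them on s is processing C*k on s.drop C.
lemma pvBLoop_shift (L : Nat) (s : List Char) (hs : L + 1 ≤ s.length) (ks : List Nat) :
    pvBLoop s ((L : Int) + 1) (ks.map (fun (k : Nat) => ((L : Int) + 1) * ((k : Int) + 1)))
      = pvBLoop (s.drop (L + 1)) ((L : Int) + 1) (ks.map (fun (k : Nat) => ((L : Int) + 1) * (k : Int))) := by
  induction ks with
  | nil => simp [pvBLoop]
  | cons k ks IH =>
    have hlen : ((s.drop (L+1)).length : Int) = (s.length : Int) - ((L : Int) + 1) := by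
      simp
      omega
    rw [List.map_cons, List.map_cons]
    simp only [pvBLoop, hlen]
    have hcond : ((s.length : Int) - ((L : Int) + 1) * ((k : Int) + 1) < 2 * ((L : Int) + 1))
        ↔ ((s.length : Int) - ((L : Int) + 1) - ((L : Int) + 1) * (k : Int) < 2 * ((L : Int) + 1)) := by
      constructor <;> intro h <;> nlinarith [h]
    by_cases hc : (s.length : Int) - ((L : Int) + 1) * ((k : Int) + 1) < 2 * ((L : Int) + 1)
    · rw [if_pos hc, if_pos (hcond.mp hc)]
      have e1 : ((L : Int) + 1) * ((k : Int) + 1) = (((L+1) * (k+1) : Nat) : Int) := by push_cast; ring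
      have e2 : ((L : Int) + 1) * (k : Int) = (((L+1) * k : Nat) : Int) := by push_cast; ring
      rw [e1, e2, PySem.List.slice_from_natCast, PySem.List.slice_from_natCast, List.drop_drop]
      congr 2
      ring
    · rw [if_neg hc, if_neg (fun h => hc (hcond.mpr h))]
      have hsh := pv_slice_shift s (L+1) k
      push_cast at hsh
      rw [hsh, IH]

lemma pvB_eq_M_aux (L : Nat) : ∀ (n : Nat) (s : List Char), s.length ≤ n →
    pvBLoop s ((L : Int) + 1) (PySem.List.pyRange 0 s.length ((L : Int) + 1)) = pvM L s := by
  intro n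
  induction n with
  | zero =>
    intro s hs
    have h0 : s = [] := List.eq_nil_of_length_eq_zero (by omega)
    subst h0
    rw [pvM]
    simp [PySem.List.pyRange, pvBLoop]
  | succ n IH =>
    intro s hs
    by_cases h0 : s = []
    · subst h0
      rw [pvM]
      simp [PySem.List.pyRange, pvBLoop]
    · have hN : 0 < s.length := List.length_pos_of_ne_nil h0
      have hC : (0 : Int) < (L : Int) + 1 := by omega
      rw [PySem.List.pyRange_of_pos _ _ hC, if_pos (by omega : (0:Int) < (s.length : Int)),
        pv_count_toNat]
      have hcnt1 : 1 ≤ (s.length + L) / (L + 1) :=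
        (Nat.le_div_iff_mul_le (by omega)).mpr (by omega)
      obtain ⟨m, hm⟩ : ∃ m, (s.length + L) / (L + 1) = m + 1 :=
        ⟨(s.length + L) / (L + 1) - 1, by omega⟩
      rw [hm, List.range_succ_eq_map, List.map_cons, pvBLoop]
      simp only [Nat.cast_zero, mul_zero, add_zero, sub_zero]
      by_cases h2 : (s.length : Int) < 2 * ((L : Int) + 1)
      · rw [if_pos h2]
        rw [show PySem.List.slice s (some 0) none = s from by
          rw [show (0:Int) = ((0:Nat):Int) from rfl, PySem.List.slice_from_natCast]; simp]
        rw [pvM]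
        by_cases h1 : s.length ≤ L + 1
        · rw [if_pos h1]
          simp [h0]
        · rw [if_neg h1, if_pos (by omega)]
      · rw [if_neg h2]
        have hbig : 2 * (L + 1) ≤ s.length := by omega
        conv_rhs => rw [pvM]
        rw [if_neg (by omega), if_neg (by omega)]
        congr 1
        · rw [show (0:Int) + ((L:Int)+1) = ((0:Nat):Int) + ((L+1:Nat):Int) from by push_cast; ring,
            show (0:Int) = ((0:Nat):Int) from rfl, PySem.List.slice_natCast_add]
          simp
        · have hmap : (List.range m).map ((fun k => (0:Int) + ((L:Int)+1) * (k:Nat)) ∘ Nat.succ)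
              = (List.range m).map (fun (k : Nat) => ((L:Int)+1) * ((k:Int) + 1)) := by
            apply List.map_congr_left
            intro k hk
            simp only [Function.comp_apply, zero_add, Nat.succ_eq_add_one]
            push_cast
            ring
          rw [List.map_map, hmap, pvBLoop_shift L s (by omega)]
          have hmap2 : (List.range m).map (fun (k : Nat) => ((L:Int)+1) * ((k:Int)))
              = (List.range m).map (fun k => (0:Int) + ((L:Int)+1) * ((k:Nat):Int)) := by
            apply List.map_congr_left
            intro k hk
            ring
          have hdroplen : (s.drop (L+1)).length = s.length - (L+1) := by simp
          have hm' : m = ((s.drop (L+1)).length + L) / (L + 1) := by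
            rw [hdroplen]
            have h2' : s.length + L = (s.length - (L+1) + L) + (L+1) := by omega
            have : (s.length + L) / (L+1) = (s.length - (L+1) + L) / (L+1) + 1 := by
              rw [h2', Nat.add_div_right _ (by omega)]
            omega
          rw [hmap2, hm']
          have hrange : (List.range (((s.drop (L+1)).length + L) / (L + 1))).map
                (fun k => (0:Int) + ((L:Int)+1) * ((k:Nat):Int))
              = PySem.List.pyRange 0 ((s.drop (L+1)).length) ((L:Int)+1) := by
            rw [PySem.List.pyRange_of_pos _ _ hC]
            by_cases hz : (s.drop (L+1)).length = 0
            · rw [hz]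
              simp [Nat.div_eq_of_lt (by omega : L < L + 1)]
            · rw [if_pos (by omega : (0:Int) < ((s.drop (L+1)).length : Int)), pv_count_toNat]
          rw [hrange, IH (s.drop (L+1)) (by simp; omega)]

lemma pvB_eq_M (L : Nat) (s : List Char) :
    pvBLoop s ((L : Int) + 1) (PySem.List.pyRange 0 s.length ((L : Int) + 1)) = pvM L s :=
  pvB_eq_M_aux L s.length s le_rfl

lemma pvB_neg (s : List Char) (L : Int) (h : L < 0) :
    pvBLoop s L (PySem.List.pyRange 0 s.length L) = [] := by
  rw [PySem.List.pyRange_of_neg _ _ h, if_neg (by omega : ¬ ((s.length : Int) < 0))]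
  simp [pvBLoop]

-- ===== VERDICT (by name: the statement is the Claim_ definition above) =====
theorem adjust_packets_spec : Claim_equal_adjust_packets := by
  unfold Claim_equal_adjust_packets
  intro bitcode len_block _ hpre
  unfold Spec_adjust_packets adjust_packets adjust_packets_alt
  congr 1
  rcases lt_or_gt_of_ne hpre with hneg | hpos
  · rw [pvChunksA_neg _ _ hneg, pvFixA_nil, pvB_neg _ _ hneg]
  · rw [show len_block = ((len_block.toNat - 1 : Nat) : Int) + 1 by omega,
      pvA_eq_M, pvB_eq_M]
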